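-- pv_equiv track=rewrite | github.com/kermitfrog-19/ps4spatialtemporal | IMU_event_clean.py | find_walking
-- ===== SOURCE A (Python) =====
-- def find_walking(peaks,thresh):
--     m = [[peaks[0]]]
--
--     for i,x in enumerate(peaks[1:]):
--         if x - peaks[i] < thresh:
--             m[-1].append(x)
--         else:
--             m.append([x])
--     lens = [len(i) for i in m]
--     walk_loc = lens.index(max(lens))
--     return m[walk_loc]
-- ===== SOURCE B (Python) =====
-- def find_walking(peaks, thresh):
--     current = [peaks[0]]
--     best = current
--     prev = peaks[0]
--     for x in peaks[1:]:
--         if x - prev < thresh: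
--             current.append(x)
--         else:
--             if len(current) > len(best):
--                 best = current
--             current = [x]
--         prev = x
--     if len(current) > len(best):
--         best = current
--     return best
-- ===== Notes on version B (the rewrite author's own statement) =====
-- stated objective: simpler
-- what changed: B never materializes the list of all runs: a single pass keeps only the current run and the first-longest run seen so far (strict '>' preserves A's first-max tie-breaking), replacing A's build-all-groups plus map-len/max/index postpass.
import Mathlib
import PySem

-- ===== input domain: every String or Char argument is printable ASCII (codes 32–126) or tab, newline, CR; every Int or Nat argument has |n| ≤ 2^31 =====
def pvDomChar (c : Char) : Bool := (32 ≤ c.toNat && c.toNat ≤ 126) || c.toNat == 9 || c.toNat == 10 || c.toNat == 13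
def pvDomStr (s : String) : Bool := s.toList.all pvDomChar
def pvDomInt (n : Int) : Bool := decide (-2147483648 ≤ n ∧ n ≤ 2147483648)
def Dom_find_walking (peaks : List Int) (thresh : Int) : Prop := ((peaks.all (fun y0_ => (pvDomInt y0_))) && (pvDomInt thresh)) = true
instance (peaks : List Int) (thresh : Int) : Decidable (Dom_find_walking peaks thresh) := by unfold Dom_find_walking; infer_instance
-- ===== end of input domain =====

-- B replaces A's grouped-lists + max/index postpass by a single pass keeping only the current and the
-- first-longest run (objective: simpler; strict '>' keeps the earlier run, matching A's lens.index(max(lens))).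

-- ===== PORT A =====
def find_walking (peaks : List Int) (thresh : Int) : List Int :=
  match peaks with
  | [] => []   -- Python: peaks[0] raises IndexError; excluded by Pre_
  | p0 :: _ =>
    -- m = [[peaks[0]]]; for i,x in enumerate(peaks[1:]): …
    let m := (PySem.List.enumerate (PySem.List.slice peaks (some 1))).foldl
      (fun m ix =>
        if ix.2 - (PySem.List.pyGet? peaks ix.1).getD 0 < thresh then
          m.dropLast ++ [(m.getLast?.getD []) ++ [ix.2]]   -- m[-1].append(x)
        else
          m ++ [[ix.2]])                                    -- m.append([x])
      [[p0]]
    let lens := m.map (fun g => (g.length : Int))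
    let walk_loc := (PySem.List.index? lens ((PySem.List.max? lens (fun y => y)).getD 0)).getD 0
    (PySem.List.pyGet? m (walk_loc : Int)).getD []

-- ===== PORT B =====
def find_walking_alt (peaks : List Int) (thresh : Int) : List Int :=
  match peaks with
  | [] => []   -- peaks[0] raises IndexError; excluded by Pre_
  | p0 :: rest =>
    -- state (best, current, prev)
    let s := rest.foldl
      (fun (s : List Int × List Int × Int) x =>
        if x - s.2.2 < thresh then (s.1, s.2.1 ++ [x], x)
        else ((if s.2.1.length > s.1.length then s.2.1 else s.1), [x], x))
      ([p0], [p0], p0)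
    if s.2.1.length > s.1.length then s.2.1 else s.1

-- ===== PRECONDITION & SPEC =====
-- Pre_ excludes only the empty list, on which Python A raises IndexError at peaks[0].
def Pre_find_walking (peaks : List Int) (thresh : Int) : Prop := peaks ≠ []
instance (peaks : List Int) (thresh : Int) : Decidable (Pre_find_walking peaks thresh) := by unfold Pre_find_walking; infer_instance
def pvWitness_find_walking : List Int × Int := ([0, 1, 5, 6, 7], 3)

def Spec_find_walking (peaks : List Int) (thresh : Int) (out : List Int) : Prop := out = find_walking_alt peaks thresh
instance (peaks : List Int) (thresh : Int) (out : List Int) : Decidable (Spec_find_walking peaks thresh out) := by unfold Spec_find_walking; infer_instance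

-- ===== CLAIM =====
def Claim_equal_find_walking : Prop := ∀ (peaks : List Int) (thresh : Int), Dom_find_walking peaks thresh → Pre_find_walking peaks thresh → Spec_find_walking peaks thresh (find_walking peaks thresh)

-- ===== LEMMAS AND PROOFS =====

/-- first-longest choice step (strict `>`: ties keep the earlier run). -/
def fwStep (b g : List Int) : List Int := if g.length > b.length then g else b

/-- A's grouping loop with the previous element and the open group carried explicitly. -/
def fwGroups (thresh : Int) (prev : Int) (ms : List (List Int)) (g : List Int) : List Int → List (List Int)
  | [] => ms ++ [g]
  | x :: xs =>
    if x - prev < thresh then fwGroups thresh x ms (g ++ [x]) xs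
    else fwGroups thresh x (ms ++ [g]) [x] xs

/-- A's selection postpass. -/
def fwAnswer (m : List (List Int)) : List Int :=
  let lens := m.map (fun g => (g.length : Int))
  let walk_loc := (PySem.List.index? lens ((PySem.List.max? lens (fun y => y)).getD 0)).getD 0
  (PySem.List.pyGet? m (walk_loc : Int)).getD []

theorem fwGroups_prefix (thresh : Int) : ∀ (xs : List Int) (prev : Int) (ms : List (List Int)) (g : List Int),
    fwGroups thresh prev ms g xs = ms ++ fwGroups thresh prev [] g xs := by
  intro xs
  induction xs with
  | nil => intro prev ms g; simp [fwGroups]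
  | cons x xs ih =>
    intro prev ms g
    simp only [fwGroups]
    split
    · exact ih x ms (g ++ [x])
    · simp only [List.nil_append]
      rw [ih x (ms ++ [g]) [x], ih x [g] [x]]
      simp

theorem fw_alt_fold (thresh : Int) : ∀ (xs : List Int) (prev : Int) (g best : List Int),
    (let s := xs.foldl
      (fun (s : List Int × List Int × Int) x =>
        if x - s.2.2 < thresh then (s.1, s.2.1 ++ [x], x)
        else ((if s.2.1.length > s.1.length then s.2.1 else s.1), [x], x))
      (best, g, prev)
     if s.2.1.length > s.1.length then s.2.1 else s.1)
    = (fwGroups thresh prev [] g xs).foldl fwStep best := by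
  intro xs
  induction xs with
  | nil => intro prev g best; simp [fwGroups, fwStep]
  | cons x xs ih =>
    intro prev g best
    simp only [List.foldl_cons, fwGroups]
    split
    · exact ih x (g ++ [x]) best
    · rw [fwGroups_prefix thresh xs x ([] ++ [g]) [x]]
      simp only [List.nil_append, List.singleton_append, List.foldl_cons]
      have h2 := ih x [x] (fwStep best g)
      simp only [fwStep] at h2 ⊢
      exact h2

theorem fwGroups_head (thresh : Int) : ∀ (xs : List Int) (prev : Int) (g : List Int),
    ∃ s t, fwGroups thresh prev [] g xs = (g ++ s) :: t := by
  intro xs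
  induction xs with
  | nil => intro prev g; exact ⟨[], [], by simp [fwGroups]⟩
  | cons x xs ih =>
    intro prev g
    simp only [fwGroups]
    split
    · obtain ⟨s, t, h⟩ := ih x (g ++ [x])
      exact ⟨[x] ++ s, t, by simpa using h⟩
    · simp only [List.nil_append]
      rw [fwGroups_prefix thresh xs x [g] [x]]
      exact ⟨[], fwGroups thresh x [] [x] xs, by simp⟩

theorem fw_enum_fold (thresh : Int) (peaks : List Int) : ∀ (rest : List Int) (n : Nat) (ms : List (List Int)) (g : List Int) (prev : Int),
    peaks.drop (n+1) = rest → peaks[n]? = some prev →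
    (PySem.List.enumerate rest (n : Int)).foldl
      (fun m ix =>
        if ix.2 - (PySem.List.pyGet? peaks ix.1).getD 0 < thresh then
          m.dropLast ++ [(m.getLast?.getD []) ++ [ix.2]]
        else
          m ++ [[ix.2]]) (ms ++ [g])
    = fwGroups thresh prev ms g rest := by
  intro rest
  induction rest with
  | nil => intro n ms g prev _ _; simp [PySem.List.enumerate, fwGroups]
  | cons x rest ih =>
    intro n ms g prev hdrop hget
    have hdrop' : peaks.drop (n+1+1) = rest := by
      rw [← List.drop_drop, hdrop]; rfl
    have hget' : peaks[n+1]? = some x := by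
      have : (peaks.drop (n+1))[0]? = peaks[n+1]? := by
        rw [List.getElem?_drop]
      rw [hdrop] at this
      simpa using this.symm
    have hcast : (n : Int) + 1 = ((n+1 : Nat) : Int) := by push_cast; ring
    show List.foldl _ _ (((n:Int), x) :: PySem.List.enumerate rest ((n:Int)+1)) = _
    simp only [List.foldl_cons, PySem.List.pyGet?_natCast, hget, Option.getD_some, fwGroups]
    rw [hcast]
    split
    · rw [List.dropLast_concat, List.getLast?_concat]
      simpa using ih (n+1) ms (g ++ [x]) x hdrop' hget'
    · rw [show ms ++ [g] ++ [[x]] = (ms ++ [g]) ++ [[x]] from rfl]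
      exact ih (n+1) (ms ++ [g]) [x] x hdrop' hget'

theorem fwAnswer_eq_foldl : ∀ (t : List (List Int)) (g : List Int),
    fwAnswer (g :: t) = t.foldl fwStep g := by
  intro t
  induction t with
  | nil =>
    intro g
    simp [fwAnswer, PySem.List.index?, PySem.List.max?, List.idxOf?_cons]
  | cons h t ih =>
    intro g
    by_cases hbg : g.length < h.length
    · -- h strictly longer than g: g can never be picked, drop it
      have key : fwAnswer (g :: h :: t) = fwAnswer (h :: t) := by
        simp only [fwAnswer, List.map_cons, PySem.List.max?_id_cons, Option.getD_some,
          PySem.List.index?, List.foldl_cons]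
        have hmaxab : max ((g.length : Int)) ((h.length : Int)) = (h.length : Int) := by
          have : ((g.length : Int)) < ((h.length : Int)) := by exact_mod_cast hbg
          omega
        rw [hmaxab]
        have hbM : ((h.length : Int)) ≤ (t.map (fun s => (s.length : Int))).foldl max ((h.length : Int)) :=
          (PySem.List.le_foldl_max _ _).1
        have hmem : (t.map (fun s => (s.length : Int))).foldl max ((h.length : Int))
            ∈ ((h.length : Int)) :: t.map (fun s => (s.length : Int)) := by
          rcases PySem.List.foldl_max_mem (t.map (fun s => (s.length : Int))) ((h.length : Int)) with h1 | h1
          · rw [h1]; exact List.mem_cons_self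
          · exact List.mem_cons_of_mem _ h1
        obtain ⟨j, hj⟩ := Option.isSome_iff_exists.mp (List.isSome_idxOf?.mpr hmem)
        have hane : (((g.length : Int)) ==
            (t.map (fun s => (s.length : Int))).foldl max ((h.length : Int))) = false := by
          simp only [beq_eq_false_iff_ne, ne_eq]
          have : ((g.length : Int)) < ((h.length : Int)) := by exact_mod_cast hbg
          omega
        rw [List.idxOf?_cons, hane, if_neg (by simp), hj]
        simp [PySem.List.pyGet?_natCast]
      rw [key, ih h]
      simp only [List.foldl_cons, fwStep, if_pos hbg]
    · -- h not longer than g: h can never be strictly first-best, drop it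
      have hba : ((h.length : Int)) ≤ ((g.length : Int)) := by
        exact_mod_cast Nat.le_of_not_lt hbg
      have key : fwAnswer (g :: h :: t) = fwAnswer (g :: t) := by
        simp only [fwAnswer, List.map_cons, PySem.List.max?_id_cons, Option.getD_some,
          PySem.List.index?, List.foldl_cons]
        have hmaxab : max ((g.length : Int)) ((h.length : Int)) = (g.length : Int) := by omega
        rw [hmaxab]
        have haM : ((g.length : Int)) ≤ (t.map (fun s => (s.length : Int))).foldl max ((g.length : Int)) :=
          (PySem.List.le_foldl_max _ _).1
        by_cases hA : ((g.length : Int)) = (t.map (fun s => (s.length : Int))).foldl max ((g.length : Int))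
        · simp [← hA, List.idxOf?_cons]
        · have hmem : (t.map (fun s => (s.length : Int))).foldl max ((g.length : Int))
              ∈ t.map (fun s => (s.length : Int)) := by
            rcases PySem.List.foldl_max_mem (t.map (fun s => (s.length : Int))) ((g.length : Int)) with h1 | h1
            · exact absurd h1.symm hA
            · exact h1
          obtain ⟨j, hj⟩ := Option.isSome_iff_exists.mp (List.isSome_idxOf?.mpr hmem)
          have hane : (((g.length : Int)) ==
              (t.map (fun s => (s.length : Int))).foldl max ((g.length : Int))) = false := by
            simp only [beq_eq_false_iff_ne, ne_eq]; exact hA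
          have hbne : (((h.length : Int)) ==
              (t.map (fun s => (s.length : Int))).foldl max ((g.length : Int))) = false := by
            simp only [beq_eq_false_iff_ne, ne_eq]
            intro hb
            exact hA (le_antisymm haM (hb ▸ hba))
          rw [List.idxOf?_cons, hane, List.idxOf?_cons, hbne, List.idxOf?_cons, hane, hj]
          simp [PySem.List.pyGet?_natCast]
          rw [show ((j : Int) + 1 + 1) = (((j + 2 : Nat)) : Int) by push_cast; ring,
            PySem.List.pyGet?_natCast]
          simp
      rw [key, ih g]
      simp only [List.foldl_cons, fwStep, if_neg hbg]

-- ===== VERDICT (by name: the statement is the Claim_ definition above) =====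
theorem find_walking_spec : Claim_equal_find_walking := by
  intro peaks thresh _ hpre
  unfold Spec_find_walking
  match peaks with
  | [] => exact absurd rfl hpre
  | p0 :: rest =>
    have hslice : PySem.List.slice (p0 :: rest) (some 1) = rest := by
      rw [PySem.List.slice_from _ (by norm_num)]
      rfl
    have hE := fw_enum_fold thresh (p0 :: rest) rest 0 [] [p0] p0 (by simp) (by simp)
    simp only [List.nil_append, Nat.cast_zero] at hE
    obtain ⟨s, t, hG⟩ := fwGroups_head thresh rest p0 [p0]
    have hA : find_walking (p0 :: rest) thresh = fwAnswer (fwGroups thresh p0 [] [p0] rest) := by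
      simp only [find_walking, hslice, hE, fwAnswer]
    have hB := fw_alt_fold thresh rest p0 [p0] [p0]
    have hBeq : find_walking_alt (p0 :: rest) thresh
        = (fwGroups thresh p0 [] [p0] rest).foldl fwStep [p0] := by
      simp only [find_walking_alt]
      exact hB
    rw [hA, hBeq, hG, fwAnswer_eq_foldl, List.foldl_cons]
    cases s <;> simp [fwStep]
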